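-- pv_equiv track=rewrite | github.com/tarantool/tarantoolup | tarantoolcluster.py | config_get_value
-- ===== SOURCE A (Python) =====
-- config_defaults = {
--     'run_dir': './run',
--     'work_dir': './data',
--     'log_dir': './log',
--     'app_dir': './app'
-- }
--
-- def instance_split(instance_name):
--     app, _, instance = instance_name.partition('.')
--
--     return app, instance
--
-- def config_get_value(config, instance_name, key):
--     app, instance = instance_split(instance_name)
--
--     sections = [app+'.'+instance, app, 'default']
--
--     for section in sections:
--         if section in config:
--             if key in config[section]:
--                 return config[section][key]
--
--     if key in config_defaults:
--         return config_defaults[key]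
-- ===== SOURCE B (Python) =====
-- config_defaults = {
--     'run_dir': './run',
--     'work_dir': './data',
--     'log_dir': './log',
--     'app_dir': './app'
-- }
--
--
-- def config_get_value(config, instance_name, key):
--     app, _, instance = instance_name.partition('.')
--     merged = {**config_defaults,
--               **config.get('default', {}),
--               **config.get(app, {}),
--               **config.get(app + '.' + instance, {})}
--     return merged.get(key)
-- ===== Notes on version B (the rewrite author's own statement) =====
-- stated objective: simpler
-- what changed: Replaces the early-return scan over three sections plus a defaults fallback by building one merged dict with ** spreads in lowest-to-highest precedence and doing a single .get(key) lookup.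
import Mathlib
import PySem

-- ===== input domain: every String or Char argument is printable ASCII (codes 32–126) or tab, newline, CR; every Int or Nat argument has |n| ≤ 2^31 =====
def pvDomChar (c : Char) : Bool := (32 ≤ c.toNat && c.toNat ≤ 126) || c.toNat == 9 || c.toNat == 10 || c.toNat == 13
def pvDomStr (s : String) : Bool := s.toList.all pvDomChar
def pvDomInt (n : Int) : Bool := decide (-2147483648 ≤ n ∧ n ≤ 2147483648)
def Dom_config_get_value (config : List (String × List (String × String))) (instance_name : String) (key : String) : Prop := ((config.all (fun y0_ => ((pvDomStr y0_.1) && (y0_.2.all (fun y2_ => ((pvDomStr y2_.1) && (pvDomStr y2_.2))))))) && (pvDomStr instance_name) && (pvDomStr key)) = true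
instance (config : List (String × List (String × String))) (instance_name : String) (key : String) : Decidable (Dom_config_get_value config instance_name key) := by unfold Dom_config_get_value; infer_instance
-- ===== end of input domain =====

-- B builds one merged dict ({**defaults, **default-section, **app-section, **app.instance-section}) and does a single
-- lookup, instead of A's early-return scan over three sections followed by a defaults fallback. No speed claim.

-- ===== PORT A =====

-- str.partition('.') has no PySem primitive: exact hand port over List Char
-- (chars before the first '.', chars after it; ('whole', '') when no '.' occurs — matching
-- that A and B only ever use parts 1 and 3 of the partition triple).
def pvPartitionDot : List Char → List Char × List Char
  | [] => ([], [])
  | c :: cs =>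
    if c = '.' then ([], cs)
    else ((pvPartitionDot cs).1.cons c, (pvPartitionDot cs).2)

-- module-level config_defaults (shared by both Pythons)
def cgvDefaults : PySem.Dict String String :=
  PySem.Dict.mk [("run_dir", "./run"), ("work_dir", "./data"), ("log_dir", "./log"), ("app_dir", "./app")]

def instance_split (instance_name : String) : String × String :=
  let p := pvPartitionDot instance_name.toList
  (String.ofList p.1, String.ofList p.2)

-- the for-loop: the first section present in config and containing key wins
def cgvScan (config : List (String × List (String × String))) (key : String) : List String → Option String
  | [] => none
  | s :: rest =>
    match (PySem.Dict.mk config).get? s with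
    | some sec =>
      match (PySem.Dict.mk sec).get? key with
      | some v => some v
      | none => cgvScan config key rest
    | none => cgvScan config key rest

def config_get_value (config : List (String × List (String × String))) (instance_name : String) (key : String) : Option String :=
  let ai := instance_split instance_name
  let sections := [String.ofList (ai.1.toList ++ '.' :: ai.2.toList), ai.1, "default"]  -- app+'.'+instance (exact concat)
  match cgvScan config key sections with
  | some v => some v
  | none => cgvDefaults.get? key  -- 'if key in config_defaults: return …' else fall off (None)

-- ===== PORT B =====

-- config.get(section, {})
def cgvGetSec (config : List (String × List (String × String))) (s : String) : List (String × String) :=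
  ((PySem.Dict.mk config).get? s).getD []

def config_get_value_alt (config : List (String × List (String × String))) (instance_name : String) (key : String) : Option String :=
  let p := pvPartitionDot instance_name.toList  -- instance_name.partition('.')
  let app := String.ofList p.1
  let merged :=  -- {**config_defaults, **config.get('default',{}), **config.get(app,{}), **config.get(app+'.'+instance,{})}
    ((cgvDefaults.update (cgvGetSec config "default")).update
        (cgvGetSec config app)).update
      (cgvGetSec config (String.ofList (app.toList ++ '.' :: p.2)))
  merged.get? key

-- ===== PRECONDITION & SPEC =====
-- Pre_ excludes association lists in which some section's pair list repeats a key: a Python dict cannot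
-- represent that input at all, and there the first-match (A's port) vs overwrite (B's ** spread) readings
-- of the duplicate encoding are both accidental.
def Pre_config_get_value (config : List (String × List (String × String))) (instance_name : String) (key : String) : Prop :=
  ∀ p ∈ config, (p.2.map Prod.fst).Nodup
instance (config : List (String × List (String × String))) (instance_name : String) (key : String) : Decidable (Pre_config_get_value config instance_name key) := by unfold Pre_config_get_value; infer_instance

def pvWitness_config_get_value : (List (String × List (String × String))) × String × String :=
  ([("default", [("k", "v")]), ("app", [("run_dir", "/r")])], "app.i", "k")

def Spec_config_get_value (config : List (String × List (String × String))) (instance_name : String) (key : String) (out : Option String) : Prop := out = config_get_value_alt config instance_name key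
instance (config : List (String × List (String × String))) (instance_name : String) (key : String) (out : Option String) : Decidable (Spec_config_get_value config instance_name key out) := by unfold Spec_config_get_value; infer_instance

-- ===== CLAIM (what is proved, stated in full; the proofs are below) =====
def Claim_equal_config_get_value : Prop := ∀ (config : List (String × List (String × String))) (instance_name : String) (key : String), Dom_config_get_value config instance_name key → Pre_config_get_value config instance_name key → Spec_config_get_value config instance_name key (config_get_value config instance_name key)

-- ===== LEMMAS AND PROOFS =====

-- a ** spread whose pair list lacks key k is transparent for lookups of k
theorem cgv_get?_update_none (d : PySem.Dict String String) (pairs : List (String × String)) (k : String)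
    (h : (PySem.Dict.mk pairs).get? k = none) :
    (d.update pairs).get? k = d.get? k := by
  induction pairs generalizing d with
  | nil => rfl
  | cons p rest ih =>
    obtain ⟨a, v⟩ := p
    rw [PySem.Dict.get?_mk_cons] at h
    by_cases ha : a = k
    · simp [ha] at h
    · simp only [beq_iff_eq, ha, if_false] at h
      have hupd : d.update ((a, v) :: rest) = (d.insert a v).update rest := rfl
      rw [hupd, ih _ h, PySem.Dict.get?_insert_of_ne _ _ (Ne.symm ha)]

-- a ** spread of a duplicate-free pair list containing key k wins the lookup of k
theorem cgv_get?_update_some (d : PySem.Dict String String) (pairs : List (String × String)) (k v : String)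
    (hnd : (pairs.map Prod.fst).Nodup) (h : (PySem.Dict.mk pairs).get? k = some v) :
    (d.update pairs).get? k = some v := by
  induction pairs generalizing d with
  | nil => simp [PySem.Dict.get?] at h
  | cons p rest ih =>
    obtain ⟨a, w⟩ := p
    simp only [List.map, List.nodup_cons] at hnd
    rw [PySem.Dict.get?_mk_cons] at h
    have hupd : d.update ((a, w) :: rest) = (d.insert a w).update rest := rfl
    by_cases ha : a = k
    · subst ha
      simp only [beq_self_eq_true, if_true, Option.some_inj] at h
      have hnone : (PySem.Dict.mk rest).get? a = none := by
        rw [PySem.Dict.get?_eq_none_iff_not_mem_keys, PySem.Dict.keys_mk]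
        exact hnd.1
      rw [hupd, cgv_get?_update_none _ _ _ hnone, PySem.Dict.get?_insert_self, h]
    · simp only [beq_iff_eq, ha, if_false] at h
      rw [hupd, ih _ hnd.2 h]

-- one ** layer: looking up key after spreading config.get(s, {}) over d
theorem cgv_layer (config : List (String × List (String × String))) (key s : String)
    (d : PySem.Dict String String) (hpre : ∀ p ∈ config, (p.2.map Prod.fst).Nodup) :
    (d.update (cgvGetSec config s)).get? key =
      match (PySem.Dict.mk config).get? s with
      | some sec =>
        match (PySem.Dict.mk sec).get? key with
        | some v => some v
        | none => d.get? key
      | none => d.get? key := by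
  unfold cgvGetSec
  cases hs : (PySem.Dict.mk config).get? s with
  | none => simpa using cgv_get?_update_none d [] key rfl
  | some sec =>
    have nd := hpre _ (PySem.Dict.mem_items_of_get?_eq_some _ hs)
    dsimp only
    cases hk : (PySem.Dict.mk sec).get? key with
    | some v => simpa using cgv_get?_update_some d sec key v nd hk
    | none => simpa using cgv_get?_update_none d sec key hk

-- ===== VERDICT (by name: the statement is the Claim_ definition above) =====
theorem config_get_value_spec : Claim_equal_config_get_value := by
  intro config instance_name key _ hpre
  unfold Spec_config_get_value config_get_value config_get_value_alt instance_split
  dsimp only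
  simp only [String.toList_ofList]
  rw [cgv_layer config key _ _ hpre, cgv_layer config key _ _ hpre, cgv_layer config key _ _ hpre]
  simp only [cgvScan]
  cases (PySem.Dict.mk config).get? (String.ofList ((pvPartitionDot instance_name.toList).1 ++ '.' :: (pvPartitionDot instance_name.toList).2)) with
  | some sec1 =>
    dsimp only
    cases (PySem.Dict.mk sec1).get? key with
    | some v => simp
    | none =>
      dsimp only
      cases (PySem.Dict.mk config).get? (String.ofList (pvPartitionDot instance_name.toList).1) with
      | some sec2 =>
        dsimp only
        cases (PySem.Dict.mk sec2).get? key with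
        | some v => simp
        | none =>
          dsimp only
          cases (PySem.Dict.mk config).get? "default" with
          | some sec3 => dsimp only; cases (PySem.Dict.mk sec3).get? key <;> simp
          | none => simp
      | none =>
        dsimp only
        cases (PySem.Dict.mk config).get? "default" with
        | some sec3 => dsimp only; cases (PySem.Dict.mk sec3).get? key <;> simp
        | none => simp
  | none =>
    dsimp only
    cases (PySem.Dict.mk config).get? (String.ofList (pvPartitionDot instance_name.toList).1) with
    | some sec2 =>
      dsimp only
      cases (PySem.Dict.mk sec2).get? key with
      | some v => simp
      | none =>
        dsimp only
        cases (PySem.Dict.mk config).get? "default" with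
        | some sec3 => dsimp only; cases (PySem.Dict.mk sec3).get? key <;> simp
        | none => simp
    | none =>
      dsimp only
      cases (PySem.Dict.mk config).get? "default" with
      | some sec3 => dsimp only; cases (PySem.Dict.mk sec3).get? key <;> simp
      | none => simp
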